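-- pv_equiv track=rewrite | github.com/gbernalle/Social_Sentiment_Insights_TCC | social_sentiment_insights_tcc/transformers/topic_analysis.py | get_topic_group_by_words
-- ===== SOURCE A (Python) =====
-- def get_topic_group_by_words(topic_keywords):
--     if not isinstance(topic_keywords, str):
--         return "Outros/Geral"
--
--     keywords = topic_keywords.lower()
--
--     if any(x in keywords for x in ['uber', '99', 'ifood', 'entregador', 'corrida', 'taxa', 'moto', 'bike', 'plataforma']):
--         return "Uberização e Apps"
--
--     elif any(x in keywords for x in ['pj', 'clt', 'férias', 'ferias', 'décimo', 'fgts', 'inss', 'carteira', 'vínculo', 'chefe', 'subordinação', 'horário', 'recrutador']):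
--         return "Pejotização e Direitos Trabalhistas"
--
--     elif any(x in keywords for x in ['dívida', 'divida', 'banco', 'empréstimo', 'emprestimo', 'nome sujo', 'serasa', 'falência', 'fome', 'conta', 'sobrevivência', 'pagar', 'dinheiro']):
--         return "Risco Financeiro e Sobrevivência"
--
--     elif any(x in keywords for x in ['cnpj', 'abrir', 'nota fiscal', 'receita', 'alvará', 'limite', 'desenquadramento', 'formalização']):
--         return "Burocracia e Formalização"
--
--     elif any(x in keywords for x in ['das', 'imposto', 'boleto', 'tributo', 'leão']):
--         return "Carga Tributária (DAS/Impostos)"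
--
--     elif any(x in keywords for x in ['investimento', 'marketing', 'cliente', 'vendas', 'lucro', 'estratégia']):
--         return "Gestão e Oportunidade"
--
--     else:
--         return "Outros/Geral"
-- ===== SOURCE B (Python) =====
-- GROUP_NAMES = [
--     "Uberização e Apps",
--     "Pejotização e Direitos Trabalhistas",
--     "Risco Financeiro e Sobrevivência",
--     "Burocracia e Formalização",
--     "Carga Tributária (DAS/Impostos)",
--     "Gestão e Oportunidade",
-- ]
--
-- KEYWORD_GROUPS = [
--     ['uber', '99', 'ifood', 'entregador', 'corrida', 'taxa', 'moto', 'bike', 'plataforma'],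
--     ['pj', 'clt', 'férias', 'ferias', 'décimo', 'fgts', 'inss', 'carteira', 'vínculo', 'chefe', 'subordinação', 'horário', 'recrutador'],
--     ['dívida', 'divida', 'banco', 'empréstimo', 'emprestimo', 'nome sujo', 'serasa', 'falência', 'fome', 'conta', 'sobrevivência', 'pagar', 'dinheiro'],
--     ['cnpj', 'abrir', 'nota fiscal', 'receita', 'alvará', 'limite', 'desenquadramento', 'formalização'],
--     ['das', 'imposto', 'boleto', 'tributo', 'leão'],
--     ['investimento', 'marketing', 'cliente', 'vendas', 'lucro', 'estratégia'],
-- ]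
--
-- NUM = len(GROUP_NAMES)
--
-- # Inverted index: keyword -> priority of its (first) group.
-- KEYWORD_PRIORITY = {}
-- for prio, kws in enumerate(KEYWORD_GROUPS):
--     for k in kws:
--         KEYWORD_PRIORITY.setdefault(k, prio)
--
-- KEY_LENGTHS = sorted({len(k) for k in KEYWORD_PRIORITY})
--
--
-- def get_topic_group_by_words(topic_keywords):
--     # Scan every substring of the input whose length is a keyword length and
--     # look it up in the inverted index; the smallest priority hit wins.
--     if not isinstance(topic_keywords, str):
--         return "Outros/Geral"
--     s = topic_keywords.lower()
--     n = len(s)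
--     best = NUM
--     for i in range(n):
--         for L in KEY_LENGTHS:
--             best = min(best, KEYWORD_PRIORITY.get(s[i:i + L], NUM))
--     return GROUP_NAMES[best] if best < NUM else "Outros/Geral"
-- ===== Notes on version B (the rewrite author's own statement) =====
-- stated objective: alternative
-- what changed: Inverts the search direction: instead of testing each of the 54 keywords for membership in the input (six any(x in s) group checks), B builds an inverted keyword-to-priority dictionary once and scans the input's substrings of keyword lengths, looking each up and keeping the smallest-priority hit.
import Mathlib
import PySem

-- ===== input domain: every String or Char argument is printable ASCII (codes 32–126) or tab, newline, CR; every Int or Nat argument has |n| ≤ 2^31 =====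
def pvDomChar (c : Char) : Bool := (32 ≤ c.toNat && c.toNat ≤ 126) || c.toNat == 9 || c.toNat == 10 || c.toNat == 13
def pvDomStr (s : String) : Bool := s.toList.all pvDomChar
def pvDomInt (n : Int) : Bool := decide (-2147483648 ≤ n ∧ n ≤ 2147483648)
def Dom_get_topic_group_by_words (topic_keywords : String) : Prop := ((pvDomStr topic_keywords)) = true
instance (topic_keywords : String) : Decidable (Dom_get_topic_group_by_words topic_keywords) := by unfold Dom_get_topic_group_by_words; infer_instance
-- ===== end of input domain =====

-- B replaces A's per-keyword substring searches (six any(x in s) group checks) by the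
-- reverse algorithm: an inverted keyword->priority index, a scan of the INPUT's substrings
-- of keyword lengths looking each up in the index, keeping the smallest priority hit
-- (objective: alternative; the isinstance guard is vacuous here, the argument is typed String).

-- ===== PORT A =====
def get_topic_group_by_words (topic_keywords : String) : String :=
  let keywords := PySem.Str.lower topic_keywords
  if ["uber", "99", "ifood", "entregador", "corrida", "taxa", "moto", "bike", "plataforma"].any
      (fun x => PySem.Str.isIn x keywords) then "Uberização e Apps"
  else if ["pj", "clt", "férias", "ferias", "décimo", "fgts", "inss", "carteira", "vínculo", "chefe", "subordinação", "horário", "recrutador"].any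
      (fun x => PySem.Str.isIn x keywords) then "Pejotização e Direitos Trabalhistas"
  else if ["dívida", "divida", "banco", "empréstimo", "emprestimo", "nome sujo", "serasa", "falência", "fome", "conta", "sobrevivência", "pagar", "dinheiro"].any
      (fun x => PySem.Str.isIn x keywords) then "Risco Financeiro e Sobrevivência"
  else if ["cnpj", "abrir", "nota fiscal", "receita", "alvará", "limite", "desenquadramento", "formalização"].any
      (fun x => PySem.Str.isIn x keywords) then "Burocracia e Formalização"
  else if ["das", "imposto", "boleto", "tributo", "leão"].any
      (fun x => PySem.Str.isIn x keywords) then "Carga Tributária (DAS/Impostos)"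
  else if ["investimento", "marketing", "cliente", "vendas", "lucro", "estratégia"].any
      (fun x => PySem.Str.isIn x keywords) then "Gestão e Oportunidade"
  else "Outros/Geral"

-- ===== PORT B =====
def pvGroupNames : List String :=
  ["Uberização e Apps", "Pejotização e Direitos Trabalhistas", "Risco Financeiro e Sobrevivência",
   "Burocracia e Formalização", "Carga Tributária (DAS/Impostos)", "Gestão e Oportunidade"]

def pvKeywordGroups : List (List String) :=
  [["uber", "99", "ifood", "entregador", "corrida", "taxa", "moto", "bike", "plataforma"],
   ["pj", "clt", "férias", "ferias", "décimo", "fgts", "inss", "carteira", "vínculo", "chefe", "subordinação", "horário", "recrutador"],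
   ["dívida", "divida", "banco", "empréstimo", "emprestimo", "nome sujo", "serasa", "falência", "fome", "conta", "sobrevivência", "pagar", "dinheiro"],
   ["cnpj", "abrir", "nota fiscal", "receita", "alvará", "limite", "desenquadramento", "formalização"],
   ["das", "imposto", "boleto", "tributo", "leão"],
   ["investimento", "marketing", "cliente", "vendas", "lucro", "estratégia"]]

-- KEYWORD_PRIORITY = {}; for prio, kws in enumerate(KEYWORD_GROUPS): for k in kws: KEYWORD_PRIORITY.setdefault(k, prio)
def pvKeywordPriority : PySem.Dict String Int :=
  (PySem.List.enumerate pvKeywordGroups).foldl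
    (fun d pr => pr.2.foldl (fun d k => d.setdefault k pr.1) d) PySem.Dict.empty

-- KEY_LENGTHS = sorted({len(k) for k in KEYWORD_PRIORITY})
def pvKeyLengths : List Int :=
  PySem.List.sorted (PySem.Set.ofList (pvKeywordPriority.keys.map PySem.Str.len)) id

def get_topic_group_by_words_alt (topic_keywords : String) : String :=
  let s := PySem.Str.lower topic_keywords
  let n : Int := PySem.Str.len s
  let best : Int := (PySem.List.pyRange 0 n 1).foldl
    (fun best i => pvKeyLengths.foldl
      (fun best L => min best (pvKeywordPriority.getD (PySem.Str.slice s (some i) (some (i + L))) 6))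
      best) 6
  if best < 6 then PySem.List.pyGetD pvGroupNames best "Outros/Geral" else "Outros/Geral"

-- ===== PRECONDITION & SPEC =====
def Spec_get_topic_group_by_words (topic_keywords : String) (out : String) : Prop := out = get_topic_group_by_words_alt topic_keywords
instance (topic_keywords : String) (out : String) : Decidable (Spec_get_topic_group_by_words topic_keywords out) := by unfold Spec_get_topic_group_by_words; infer_instance

-- ===== CLAIM (what is proved, stated in full; the proofs are below) =====
def Claim_equal_get_topic_group_by_words : Prop := ∀ (topic_keywords : String), Dom_get_topic_group_by_words topic_keywords → Spec_get_topic_group_by_words topic_keywords (get_topic_group_by_words topic_keywords)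

-- ===== LEMMAS AND PROOFS =====

-- B's inner lookup, inner fold over lengths and full nested fold, named for the proofs.
def pvF (s : String) (i L : Int) : Int :=
  pvKeywordPriority.getD (PySem.Str.slice s (some i) (some (i + L))) 6

def pvInner (s : String) (i b : Int) : Int :=
  pvKeyLengths.foldl (fun b L => min b (pvF s i L)) b

def pvBest (s : String) : Int :=
  (PySem.List.pyRange 0 (PySem.Str.len s) 1).foldl (fun b i => pvInner s i b) 6

lemma pv_alt_eq (tk : String) : get_topic_group_by_words_alt tk =
    (if pvBest (PySem.Str.lower tk) < 6 then
      PySem.List.pyGetD pvGroupNames (pvBest (PySem.Str.lower tk)) "Outros/Geral"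
     else "Outros/Geral") := rfl

-- generic facts about decreasing folds
lemma pv_foldl_dec_le_init {α : Type} (g : Int → α → Int) (hg : ∀ b x, g b x ≤ b)
    (l : List α) (b : Int) : l.foldl g b ≤ b := by
  induction l generalizing b with
  | nil => simp
  | cons x t ih => exact le_trans (ih (g b x)) (hg b x)

lemma pv_foldl_dec_le_of_mem {α : Type} (g : Int → α → Int) (hg : ∀ b x, g b x ≤ b)
    {x : α} {l : List α} (hx : x ∈ l) (v : Int) (hv : ∀ b, g b x ≤ v) (b : Int) :
    l.foldl g b ≤ v := by
  induction l generalizing b with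
  | nil => cases hx
  | cons y t ih =>
    rcases List.mem_cons.mp hx with h | h
    · subst h
      exact le_trans (pv_foldl_dec_le_init g hg t (g b x)) (hv b)
    · exact ih h (g b y)

lemma pv_le_foldl {α : Type} (g : Int → α → Int) (c : Int) {l : List α}
    (hp : ∀ b, ∀ x ∈ l, c ≤ b → c ≤ g b x) (b : Int) (hb : c ≤ b) : c ≤ l.foldl g b := by
  induction l generalizing b with
  | nil => simpa
  | cons x t ih =>
    exact ih (fun b y hy hcb => hp b y (List.mem_cons_of_mem x hy) hcb)
      (g b x) (hp b x List.mem_cons_self hb)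

-- the literal data, checked once by the kernel
set_option maxRecDepth 40000 in
lemma pv_group_fact : ∀ j ∈ List.range 6, ∀ k ∈ pvKeywordGroups.getD j [],
    pvKeywordPriority.getD k 6 ≤ (j : Int) ∧ ((k.toList.length : Int) ∈ pvKeyLengths) ∧ k.toList ≠ [] := by
  decide

set_option maxRecDepth 40000 in
lemma pv_key_fact : ∀ t ∈ pvKeywordPriority.keys, ∃ j ∈ List.range 6,
    pvKeywordPriority.getD t 6 = (j : Int) ∧ t ∈ pvKeywordGroups.getD j [] := by
  decide

set_option maxRecDepth 40000 in
lemma pv_lengths_pos : ∀ L ∈ pvKeyLengths, 0 < L := by decide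

-- slices of the scan are infixes; every infix keyword is hit by some slice
lemma pv_slice_toList (s : String) (i L : Int) (hi : 0 ≤ i) (hL : 0 ≤ L) :
    (PySem.Str.slice s (some i) (some (i + L))).toList
      = (s.toList.drop i.toNat).take ((i + L).toNat - i.toNat) := by
  simp only [PySem.Str.toList_slice, PySem.Chars.slice_eq_listSlice]
  exact PySem.List.slice_toNat _ hi (by omega)

lemma pv_slice_infix (s : String) (i L : Int) (hi : 0 ≤ i) (hL : 0 ≤ L) :
    (PySem.Str.slice s (some i) (some (i + L))).toList <:+: s.toList := by
  rw [pv_slice_toList s i L hi hL]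
  exact ((List.take_prefix _ _).isInfix).trans ((List.drop_suffix _ _).isInfix)

lemma pv_exists_slice (s k : String) (hk : k.toList ≠ []) (hinf : k.toList <:+: s.toList) :
    ∃ i : Int, 0 ≤ i ∧ i < PySem.Str.len s ∧
      PySem.Str.slice s (some i) (some (i + (k.toList.length : Int))) = k := by
  obtain ⟨u, v, he⟩ := hinf
  refine ⟨(u.length : Int), by positivity, ?_, ?_⟩
  · have hlen := congrArg List.length he
    simp only [List.length_append] at hlen
    have hkpos : 0 < k.toList.length := List.length_pos_iff.mpr hk
    simp only [PySem.Str.len_eq]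
    omega
  · apply String.toList_inj.mp
    rw [pv_slice_toList s _ _ (by positivity) (by positivity)]
    have h1 : ((u.length : Int)).toNat = u.length := by omega
    have h2 : (((u.length : Int) + (k.toList.length : Int))).toNat = u.length + k.toList.length := by
      omega
    rw [h1, h2, ← he]
    rw [List.append_assoc, List.drop_left]
    simp

-- bridging A's conditions
lemma pv_any_true (l : List String) (s : String)
    (h : l.any (fun x => PySem.Str.isIn x s) = true) :
    ∃ k ∈ l, PySem.Chars.isIn k.toList s.toList = true := by
  simpa only [List.any_eq_true, PySem.Str.isIn_eq] using h

lemma pv_any_false (l : List String) (s : String)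
    (h : ¬ l.any (fun x => PySem.Str.isIn x s) = true) :
    ∀ k ∈ l, PySem.Chars.isIn k.toList s.toList = false := by
  intro k hk
  by_contra hne
  exact h (List.any_eq_true.mpr ⟨k, hk, by
    rw [PySem.Str.isIn_eq]; exact Bool.of_not_eq_false hne⟩)

-- the two bounds on pvBest
lemma pv_best_le (s : String) {j : Nat} (hj : j < 6)
    (hm : ∃ k ∈ pvKeywordGroups.getD j [], PySem.Chars.isIn k.toList s.toList = true) :
    pvBest s ≤ (j : Int) := by
  unfold pvBest
  obtain ⟨k, hkmem, hkin⟩ := hm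
  obtain ⟨hprio, hLmem, hne⟩ :=
    pv_group_fact j (List.mem_range.mpr hj) k hkmem
  obtain ⟨i, hi0, hilt, hslice⟩ :=
    pv_exists_slice s k hne ((PySem.Chars.isIn_iff_infix _ _).mp hkin)
  have hinner : ∀ b, pvInner s i b ≤ (j : Int) := by
    intro b
    have hf : pvF s i (k.toList.length : Int) ≤ (j : Int) := by
      unfold pvF; rw [hslice]; exact hprio
    unfold pvInner
    exact pv_foldl_dec_le_of_mem (fun b L => min b (pvF s i L)) (fun b L => min_le_left _ _)
      hLmem _ (fun b => le_trans (min_le_right _ _) hf) b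
  have himem : i ∈ PySem.List.pyRange 0 (PySem.Str.len s) 1 := by
    simp only [PySem.List.mem_pyRange_one]; exact ⟨hi0, hilt⟩
  exact pv_foldl_dec_le_of_mem (fun b i => pvInner s i b)
    (fun b i => pv_foldl_dec_le_init _ (fun b L => min_le_left _ _) _ b) himem _ hinner 6

lemma pv_le_best (s : String) (c : Int) (hc : c ≤ 6)
    (hno : ∀ j ∈ List.range 6, (j : Int) < c →
      ∀ k ∈ pvKeywordGroups.getD j [], PySem.Chars.isIn k.toList s.toList = false) :
    c ≤ pvBest s := by
  unfold pvBest
  apply pv_le_foldl _ _ _ 6 hc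
  intro b i himem hcb
  apply pv_le_foldl _ _ _ b hcb
  intro b' L hL hcb'
  refine le_min hcb' ?_
  set t := PySem.Str.slice s (some i) (some (i + L)) with ht
  by_cases hct : pvKeywordPriority.contains t = true
  · have htk : t ∈ pvKeywordPriority.keys := by
      rw [PySem.Dict.contains_eq_decide_mem_keys] at hct
      exact of_decide_eq_true hct
    obtain ⟨j, hjr, hgd, hgmem⟩ := pv_key_fact t htk
    have hi0 : 0 ≤ i := (PySem.List.mem_pyRange_one.mp himem).1
    have hinf : t.toList <:+: s.toList :=
      pv_slice_infix s i L hi0 (le_of_lt (pv_lengths_pos L hL))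
    have hIn : PySem.Chars.isIn t.toList s.toList = true :=
      (PySem.Chars.isIn_iff_infix _ _).mpr hinf
    unfold pvF
    rw [← ht, hgd]
    by_contra hlt
    have hjc : (j : Int) < c := by omega
    rw [hno j hjr hjc t hgmem] at hIn
    cases hIn
  · have h6 : pvKeywordPriority.getD t 6 = 6 :=
      PySem.Dict.getD_of_not_contains _ _ (Bool.not_eq_true _ ▸ hct)
    unfold pvF
    rw [← ht, h6]
    exact hc

lemma pv_best_le_six (s : String) : pvBest s ≤ 6 :=
  pv_foldl_dec_le_init _ (fun b i => pv_foldl_dec_le_init _ (fun b L => min_le_left _ _) _ b) _ 6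

-- ===== VERDICT (by name: the statement is the Claim_ definition above) =====
set_option maxRecDepth 40000 in
theorem get_topic_group_by_words_spec : Claim_equal_get_topic_group_by_words := by
  intro tk _
  unfold Spec_get_topic_group_by_words
  unfold get_topic_group_by_words
  simp only []
  split_ifs with h1 h2 h3 h4 h5 h6
  · have hle := pv_best_le (PySem.Str.lower tk) (j := 0) (by omega) (pv_any_true _ _ h1)
    have hge := pv_le_best (PySem.Str.lower tk) 0 (by omega) (by intro j hj hlt; omega)
    have hb : pvBest (PySem.Str.lower tk) = 0 := le_antisymm hle hge
    rw [pv_alt_eq, hb]; decide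
  · have H1 := pv_any_false _ _ h1
    have hle := pv_best_le (PySem.Str.lower tk) (j := 1) (by omega) (pv_any_true _ _ h2)
    have hge := pv_le_best (PySem.Str.lower tk) 1 (by omega) (by
      intro j hj hlt; rw [List.mem_range] at hj; interval_cases j
      · exact H1
      all_goals omega)
    have hb : pvBest (PySem.Str.lower tk) = 1 := le_antisymm hle hge
    rw [pv_alt_eq, hb]; decide
  · have H1 := pv_any_false _ _ h1
    have H2 := pv_any_false _ _ h2
    have hle := pv_best_le (PySem.Str.lower tk) (j := 2) (by omega) (pv_any_true _ _ h3)
    have hge := pv_le_best (PySem.Str.lower tk) 2 (by omega) (by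
      intro j hj hlt; rw [List.mem_range] at hj; interval_cases j
      · exact H1
      · exact H2
      all_goals omega)
    have hb : pvBest (PySem.Str.lower tk) = 2 := le_antisymm hle hge
    rw [pv_alt_eq, hb]; decide
  · have H1 := pv_any_false _ _ h1
    have H2 := pv_any_false _ _ h2
    have H3 := pv_any_false _ _ h3
    have hle := pv_best_le (PySem.Str.lower tk) (j := 3) (by omega) (pv_any_true _ _ h4)
    have hge := pv_le_best (PySem.Str.lower tk) 3 (by omega) (by
      intro j hj hlt; rw [List.mem_range] at hj; interval_cases j
      · exact H1
      · exact H2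
      · exact H3
      all_goals omega)
    have hb : pvBest (PySem.Str.lower tk) = 3 := le_antisymm hle hge
    rw [pv_alt_eq, hb]; decide
  · have H1 := pv_any_false _ _ h1
    have H2 := pv_any_false _ _ h2
    have H3 := pv_any_false _ _ h3
    have H4 := pv_any_false _ _ h4
    have hle := pv_best_le (PySem.Str.lower tk) (j := 4) (by omega) (pv_any_true _ _ h5)
    have hge := pv_le_best (PySem.Str.lower tk) 4 (by omega) (by
      intro j hj hlt; rw [List.mem_range] at hj; interval_cases j
      · exact H1
      · exact H2
      · exact H3
      · exact H4
      all_goals omega)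
    have hb : pvBest (PySem.Str.lower tk) = 4 := le_antisymm hle hge
    rw [pv_alt_eq, hb]; decide
  · have H1 := pv_any_false _ _ h1
    have H2 := pv_any_false _ _ h2
    have H3 := pv_any_false _ _ h3
    have H4 := pv_any_false _ _ h4
    have H5 := pv_any_false _ _ h5
    have hle := pv_best_le (PySem.Str.lower tk) (j := 5) (by omega) (pv_any_true _ _ h6)
    have hge := pv_le_best (PySem.Str.lower tk) 5 (by omega) (by
      intro j hj hlt; rw [List.mem_range] at hj; interval_cases j
      · exact H1
      · exact H2
      · exact H3
      · exact H4
      · exact H5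
      omega)
    have hb : pvBest (PySem.Str.lower tk) = 5 := le_antisymm hle hge
    rw [pv_alt_eq, hb]; decide
  · have H1 := pv_any_false _ _ h1
    have H2 := pv_any_false _ _ h2
    have H3 := pv_any_false _ _ h3
    have H4 := pv_any_false _ _ h4
    have H5 := pv_any_false _ _ h5
    have H6 := pv_any_false _ _ h6
    have hge := pv_le_best (PySem.Str.lower tk) 6 le_rfl (by
      intro j hj hlt; rw [List.mem_range] at hj; interval_cases j
      · exact H1
      · exact H2
      · exact H3
      · exact H4
      · exact H5
      · exact H6)
    have hb : pvBest (PySem.Str.lower tk) = 6 :=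
      le_antisymm (pv_best_le_six _) hge
    rw [pv_alt_eq, hb]; decide
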